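-- pv_equiv track=rewrite | github.com/mana-ai/friday | utils/time_utils/lunar_to_solar.py | get_lunar_days_to_lday
-- ===== SOURCE A (Python) =====
-- LUNAR_CALENDAR_TABLE = [
--     0x04AE53, 0x0A5748, 0x5526BD, 0x0D2650, 0x0D9544, 0x46AAB9, 0x056A4D, 0x09AD42, 0x24AEB6, 0x04AE4A,
--     # //*1901-1910*/
--     0x6A4DBE, 0x0A4D52, 0x0D2546, 0x5D52BA, 0x0B544E, 0x0D6A43, 0x296D37, 0x095B4B, 0x749BC1, 0x049754,
--     # //*1911-1920*/
--     0x0A4B48, 0x5B25BC, 0x06A550, 0x06D445, 0x4ADAB8, 0x02B64D, 0x095742, 0x2497B7, 0x04974A, 0x664B3E,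
--     # //*1921-1930*/
--     0x0D4A51, 0x0EA546, 0x56D4BA, 0x05AD4E, 0x02B644, 0x393738, 0x092E4B, 0x7C96BF, 0x0C9553, 0x0D4A48,
--     # //*1931-1940*/
--     0x6DA53B, 0x0B554F, 0x056A45, 0x4AADB9, 0x025D4D, 0x092D42, 0x2C95B6, 0x0A954A, 0x7B4ABD, 0x06CA51,
--     # //*1941-1950*/
--     0x0B5546, 0x555ABB, 0x04DA4E, 0x0A5B43, 0x352BB8, 0x052B4C, 0x8A953F, 0x0E9552, 0x06AA48, 0x6AD53C,
--     # //*1951-1960*/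
--     0x0AB54F, 0x04B645, 0x4A5739, 0x0A574D, 0x052642, 0x3E9335, 0x0D9549, 0x75AABE, 0x056A51, 0x096D46,
--     # //*1961-1970*/
--     0x54AEBB, 0x04AD4F, 0x0A4D43, 0x4D26B7, 0x0D254B, 0x8D52BF, 0x0B5452, 0x0B6A47, 0x696D3C, 0x095B50,
--     # //*1971-1980*/
--     0x049B45, 0x4A4BB9, 0x0A4B4D, 0xAB25C2, 0x06A554, 0x06D449, 0x6ADA3D, 0x0AB651, 0x093746, 0x5497BB,
--     # //*1981-1990*/
--     0x04974F, 0x064B44, 0x36A537, 0x0EA54A, 0x86B2BF, 0x05AC53, 0x0AB647, 0x5936BC, 0x092E50, 0x0C9645,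
--     # //*1991-2000*/
--     0x4D4AB8, 0x0D4A4C, 0x0DA541, 0x25AAB6, 0x056A49, 0x7AADBD, 0x025D52, 0x092D47, 0x5C95BA, 0x0A954E,
--     # //*2001-2010*/
--     0x0B4A43, 0x4B5537, 0x0AD54A, 0x955ABF, 0x04BA53, 0x0A5B48, 0x652BBC, 0x052B50, 0x0A9345, 0x474AB9,
--     # //*2011-2020*/
--     0x06AA4C, 0x0AD541, 0x24DAB6, 0x04B64A, 0x69573D, 0x0A4E51, 0x0D2646, 0x5E933A, 0x0D534D, 0x05AA43,
--     # //*2021-2030*/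
--     0x36B537, 0x096D4B, 0xB4AEBF, 0x04AD53, 0x0A4D48, 0x6D25BC, 0x0D254F, 0x0D5244, 0x5DAA38, 0x0B5A4C,
--     # //*2031-2040*/
--     0x056D41, 0x24ADB6, 0x049B4A, 0x7A4BBE, 0x0A4B51, 0x0AA546, 0x5B52BA, 0x06D24E, 0x0ADA42, 0x355B37,
--     # //*2041-2050*/
--     0x09374B, 0x8497C1, 0x049753, 0x064B48, 0x66A53C, 0x0EA54F, 0x06B244, 0x4AB638, 0x0AAE4C, 0x092E42,
--     # //*2051-2060*/
--     0x3C9735, 0x0C9649, 0x7D4ABD, 0x0D4A51, 0x0DA545, 0x55AABA, 0x056A4E, 0x0A6D43, 0x452EB7, 0x052D4B,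
--     # //*2061-2070*/
--     0x8A95BF, 0x0A9553, 0x0B4A47, 0x6B553B, 0x0AD54F, 0x055A45, 0x4A5D38, 0x0A5B4C, 0x052B42, 0x3A93B6,
--     # //*2071-2080*/
--     0x069349, 0x7729BD, 0x06AA51, 0x0AD546, 0x54DABA, 0x04B64E, 0x0A5743, 0x452738, 0x0D264A, 0x8E933E,
--     # //*2081-2090*/
--     0x0D5252, 0x0DAA47, 0x66B53B, 0x056D4F, 0x04AE45, 0x4A4EB9, 0x0A4D4C, 0x0D1541, 0x2D92B5  # //*2091-2099*/
-- ]
--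
-- def is_leap_lmonth(lyear, lmonth):
--     leap_month = (LUNAR_CALENDAR_TABLE[lyear - 1901] >> 20) & 0xF  # 为0表示无闰月
--     if leap_month != 0 and lmonth == leap_month:
--         return True
--     else:
--         return False
--
-- def get_lunar_days_to_lday(lyear, lmonth, lday, is_leap_month):
--     lunar_days = 0  # 正月初一到给定农历日期的总天数
--     lmonth_index = lday_index = 1  # 农历月份，日期遍历索引
--     leap_month_days = 0  # 暂存闰月前月的天数
--     bits = 19  # 遍历获取大小月索引, 大月:1, 小月:0
--
--     # 　遍历月份至当前月，累加得到总间隔天数，若有闰月出现，则有三种情形：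
--     # １.给定月份小于闰月;
--     # ２.给定月份就是闰月
--     # ３.给定月份在闰月之后
--     for lmonth_index in range(1, 14):
--         l_big_month = (LUNAR_CALENDAR_TABLE[lyear - 1901] >> bits) & 0x1  # 当前月大小
--
--         # 　农历月份所以小于给定月份，所有情况适用
--         if lmonth_index < lmonth:
--             lunar_days += 29 + l_big_month  # 加上当前月天数
--         # 如果当前索引为闰月数字，则暂存其天数，情况２适用
--         if is_leap_lmonth(lyear, lmonth_index):
--             leap_month_days = 29 + l_big_month
--             # 暂存当前月(其下月为闰月)天数  # 当前索引减１月份为闰月，若又闰月出现，则索引数字表示实际月份+1，所以需要特殊处理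
--         if is_leap_lmonth(lyear, lmonth_index - 1):
--             if lmonth_index - 1 == lmonth and is_leap_month:  # 情况２，给定月为闰月
--                 lunar_days += leap_month_days
--                 break
--             if lmonth_index == lmonth:
--                 lunar_days += 29 + l_big_month  # 加上当前月（闰月）天数
--                 break
--             if lmonth_index - 1 < lmonth and lmonth_index != lmonth:  # 给定月大于闰月的下一月，即当前月份索引为实际月份+1
--                 lmonth += 1  # 索引月份+1，则lmonth＋１进行下一轮比较
--         bits -= 1  # 跳至下个月
--     lunar_days += lday  # 加上农历日期天数
--     return lunar_days
-- ===== SOURCE B (Python) =====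
-- # Per-year (leap_month, 13-bit month-size mask) pairs derived from the original
-- # packed lunar table; months are counted by a closed-form slot index and a popcount.
-- LUNAR_YEAR_INFO = [
--     (0, 2396), (0, 5294), (5, 2637), (0, 6732), (0, 6954), (4, 3413), (0, 2772), (0, 4954), (2, 2397), (0, 2396),
--     (6, 5275), (0, 5274), (0, 6730), (5, 6821), (0, 5800), (0, 6868), (2, 4826), (0, 4790), (7, 2359), (0, 2350),
--     (0, 5270), (5, 5707), (0, 3402), (0, 3496), (4, 5557), (0, 1388), (0, 4782), (2, 2351), (0, 2350), (6, 3222),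
--     (0, 6804), (0, 7498), (5, 3497), (0, 2906), (0, 1388), (3, 4718), (0, 4700), (7, 6445), (0, 6442), (0, 6804),
--     (6, 6986), (0, 5802), (0, 2772), (4, 5467), (0, 1210), (0, 4698), (2, 6443), (0, 5418), (7, 5781), (0, 3476),
--     (0, 5802), (5, 2741), (0, 2484), (0, 5302), (3, 2647), (0, 2646), (8, 5418), (0, 7466), (0, 3412), (6, 5546),
--     (0, 5482), (0, 2412), (4, 5294), (0, 5294), (0, 2636), (3, 7462), (0, 6954), (7, 2901), (0, 2772), (0, 4826),
--     (5, 2397), (0, 2394), (0, 5274), (4, 6733), (0, 6730), (8, 6821), (0, 5800), (0, 5844), (6, 4826), (0, 4790),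
--     (0, 2358), (4, 5271), (0, 5270), (10, 5707), (0, 3402), (0, 3496), (6, 5556), (0, 5484), (0, 4718), (5, 2351),
--     (0, 2350), (0, 3222), (3, 3402), (0, 7498), (8, 3429), (0, 2904), (0, 5484), (5, 4717), (0, 4700), (0, 6444),
--     (4, 6805), (0, 6804), (0, 6986), (2, 2901), (0, 2772), (7, 5467), (0, 1210), (0, 4698), (5, 6443), (0, 5418),
--     (0, 5780), (4, 5802), (0, 5546), (9, 2741), (0, 2420), (0, 5302), (6, 2647), (0, 2646), (0, 5414), (4, 3733),
--     (0, 3412), (0, 5546), (2, 2485), (0, 2412), (6, 4782), (0, 5276), (0, 6732), (5, 7462), (0, 6822), (0, 2900),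
--     (3, 3434), (0, 4826), (11, 2397), (0, 2394), (0, 5274), (6, 6731), (0, 6730), (0, 6820), (5, 6996), (0, 5812),
--     (0, 2778), (2, 2395), (0, 2358), (7, 5271), (0, 5270), (0, 5450), (5, 5797), (0, 3492), (0, 5556), (3, 2742),
--     (0, 4718), (8, 2351), (0, 2350), (0, 3222), (6, 3402), (0, 7498), (0, 3428), (4, 5484), (0, 5468), (0, 4700),
--     (3, 6446), (0, 6444), (7, 6805), (0, 6804), (0, 6986), (5, 2901), (0, 2772), (0, 5338), (4, 2653), (0, 2650),
--     (8, 5419), (0, 5418), (0, 5780), (6, 5802), (0, 5546), (0, 2740), (4, 5306), (0, 5302), (0, 2646), (3, 5415),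
--     (0, 3366), (7, 3667), (0, 3412), (0, 5546), (5, 2485), (0, 2412), (0, 5294), (4, 2638), (0, 6732), (8, 7462),
--     (0, 6820), (0, 6996), (6, 3434), (0, 2778), (0, 2396), (4, 5277), (0, 5274), (0, 6698), (2, 6949)
-- ]
--
-- def get_lunar_days_to_lday(lyear, lmonth, lday, is_leap_month):
--     leap, mask = LUNAR_YEAR_INFO[lyear - 1901]
--     # slot position of the requested month: slots after the leap month shift right by one
--     if leap != 0 and (lmonth > leap or (lmonth == leap and is_leap_month)):
--         p = lmonth + 1
--     else:
--         p = lmonth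
--     n = max(0, min(13, p - 1))  # number of complete month slots before the requested one
--     # each complete slot contributes 29 days plus one more for each set bit (big month)
--     return 29 * n + bin(mask >> (13 - n)).count("1") + lday
-- ===== Notes on version B (the rewrite author's own statement) =====
-- stated objective: simpler
-- what changed: Replaces the stateful 13-iteration loop (in-loop month shifting, leap-day stash, break) by a pre-decoded per-year (leap month, 13-bit size mask) table, a closed-form slot index p, and a single popcount: days = 29*n + popcount(top n mask bits) + lday with n clamped to 0..13.
import Mathlib
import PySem

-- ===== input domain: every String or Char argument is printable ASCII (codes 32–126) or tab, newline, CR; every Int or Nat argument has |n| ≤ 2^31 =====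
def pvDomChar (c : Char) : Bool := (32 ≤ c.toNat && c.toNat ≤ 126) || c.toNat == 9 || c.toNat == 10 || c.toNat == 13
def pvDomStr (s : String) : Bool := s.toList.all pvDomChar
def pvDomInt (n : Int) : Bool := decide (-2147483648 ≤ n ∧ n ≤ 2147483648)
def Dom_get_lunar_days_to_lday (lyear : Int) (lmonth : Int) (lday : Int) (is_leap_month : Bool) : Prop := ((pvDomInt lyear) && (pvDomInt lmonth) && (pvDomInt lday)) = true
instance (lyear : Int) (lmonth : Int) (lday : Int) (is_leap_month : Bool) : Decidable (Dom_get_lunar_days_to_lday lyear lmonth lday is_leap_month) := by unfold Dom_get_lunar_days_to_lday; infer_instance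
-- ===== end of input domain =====

-- B replaces A's stateful 13-iteration loop (month-index shifting, leap-day stash, break)
-- by a pre-decoded (leap month, month-size mask) table, a closed-form slot index and one
-- popcount (objective: simpler).

-- ===== PORT A =====
def LUNAR_CALENDAR_TABLE : List Int := [
  0x04AE53, 0x0A5748, 0x5526BD, 0x0D2650, 0x0D9544, 0x46AAB9, 0x056A4D, 0x09AD42, 0x24AEB6, 0x04AE4A,
  0x6A4DBE, 0x0A4D52, 0x0D2546, 0x5D52BA, 0x0B544E, 0x0D6A43, 0x296D37, 0x095B4B, 0x749BC1, 0x049754,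
  0x0A4B48, 0x5B25BC, 0x06A550, 0x06D445, 0x4ADAB8, 0x02B64D, 0x095742, 0x2497B7, 0x04974A, 0x664B3E,
  0x0D4A51, 0x0EA546, 0x56D4BA, 0x05AD4E, 0x02B644, 0x393738, 0x092E4B, 0x7C96BF, 0x0C9553, 0x0D4A48,
  0x6DA53B, 0x0B554F, 0x056A45, 0x4AADB9, 0x025D4D, 0x092D42, 0x2C95B6, 0x0A954A, 0x7B4ABD, 0x06CA51,
  0x0B5546, 0x555ABB, 0x04DA4E, 0x0A5B43, 0x352BB8, 0x052B4C, 0x8A953F, 0x0E9552, 0x06AA48, 0x6AD53C,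
  0x0AB54F, 0x04B645, 0x4A5739, 0x0A574D, 0x052642, 0x3E9335, 0x0D9549, 0x75AABE, 0x056A51, 0x096D46,
  0x54AEBB, 0x04AD4F, 0x0A4D43, 0x4D26B7, 0x0D254B, 0x8D52BF, 0x0B5452, 0x0B6A47, 0x696D3C, 0x095B50,
  0x049B45, 0x4A4BB9, 0x0A4B4D, 0xAB25C2, 0x06A554, 0x06D449, 0x6ADA3D, 0x0AB651, 0x093746, 0x5497BB,
  0x04974F, 0x064B44, 0x36A537, 0x0EA54A, 0x86B2BF, 0x05AC53, 0x0AB647, 0x5936BC, 0x092E50, 0x0C9645,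
  0x4D4AB8, 0x0D4A4C, 0x0DA541, 0x25AAB6, 0x056A49, 0x7AADBD, 0x025D52, 0x092D47, 0x5C95BA, 0x0A954E,
  0x0B4A43, 0x4B5537, 0x0AD54A, 0x955ABF, 0x04BA53, 0x0A5B48, 0x652BBC, 0x052B50, 0x0A9345, 0x474AB9,
  0x06AA4C, 0x0AD541, 0x24DAB6, 0x04B64A, 0x69573D, 0x0A4E51, 0x0D2646, 0x5E933A, 0x0D534D, 0x05AA43,
  0x36B537, 0x096D4B, 0xB4AEBF, 0x04AD53, 0x0A4D48, 0x6D25BC, 0x0D254F, 0x0D5244, 0x5DAA38, 0x0B5A4C,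
  0x056D41, 0x24ADB6, 0x049B4A, 0x7A4BBE, 0x0A4B51, 0x0AA546, 0x5B52BA, 0x06D24E, 0x0ADA42, 0x355B37,
  0x09374B, 0x8497C1, 0x049753, 0x064B48, 0x66A53C, 0x0EA54F, 0x06B244, 0x4AB638, 0x0AAE4C, 0x092E42,
  0x3C9735, 0x0C9649, 0x7D4ABD, 0x0D4A51, 0x0DA545, 0x55AABA, 0x056A4E, 0x0A6D43, 0x452EB7, 0x052D4B,
  0x8A95BF, 0x0A9553, 0x0B4A47, 0x6B553B, 0x0AD54F, 0x055A45, 0x4A5D38, 0x0A5B4C, 0x052B42, 0x3A93B6,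
  0x069349, 0x7729BD, 0x06AA51, 0x0AD546, 0x54DABA, 0x04B64E, 0x0A5743, 0x452738, 0x0D264A, 0x8E933E,
  0x0D5252, 0x0DAA47, 0x66B53B, 0x056D4F, 0x04AE45, 0x4A4EB9, 0x0A4D4C, 0x0D1541, 0x2D92B5
]

-- Python '(a >> k) & m' ; exact for a ≥ 0 and k ≥ 0 (all table entries and all shift
-- amounts reached here are nonnegative).
def pyShrAnd (a : Int) (k : Int) (m : Nat) : Int := (((a.toNat >>> k.toNat) &&& m : Nat) : Int)

def is_leap_lmonth (lyear : Int) (lmonth : Int) : Bool :=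
  let leap_month := pyShrAnd ((PySem.List.pyGet? LUNAR_CALENDAR_TABLE (lyear - 1901)).getD 0) 20 0xF
  if leap_month ≠ 0 ∧ lmonth = leap_month then true else false

-- the 'for lmonth_index in range(1, 14)' loop of A, with 'break' as direct return;
-- state: lunar_days, lmonth (A mutates it), leap_month_days, bits
def get_loop (lyear : Int) (is_leap_month : Bool) (lunar_days lmonth leap_month_days bits : Int) :
    List Int → Int
  | [] => lunar_days
  | lmonth_index :: rest =>
    let l_big_month := pyShrAnd ((PySem.List.pyGet? LUNAR_CALENDAR_TABLE (lyear - 1901)).getD 0) bits 1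
    let lunar_days := if lmonth_index < lmonth then lunar_days + (29 + l_big_month) else lunar_days
    let leap_month_days := if is_leap_lmonth lyear lmonth_index then 29 + l_big_month else leap_month_days
    if is_leap_lmonth lyear (lmonth_index - 1) then
      if lmonth_index - 1 = lmonth ∧ is_leap_month = true then lunar_days + leap_month_days
      else if lmonth_index = lmonth then lunar_days + (29 + l_big_month)
      else
        let lmonth := if lmonth_index - 1 < lmonth ∧ lmonth_index ≠ lmonth then lmonth + 1 else lmonth
        get_loop lyear is_leap_month lunar_days lmonth leap_month_days (bits - 1) rest
    else get_loop lyear is_leap_month lunar_days lmonth leap_month_days (bits - 1) rest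

def get_lunar_days_to_lday (lyear : Int) (lmonth : Int) (lday : Int) (is_leap_month : Bool) : Int :=
  get_loop lyear is_leap_month 0 lmonth 0 19 (PySem.List.pyRange 1 14 1) + lday

-- ===== PORT B =====
-- Source B's LUNAR_YEAR_INFO: per-year (leap month, 13-bit month-size mask) pairs
def LUNAR_YEAR_INFO : List (Int × Int) := [
  (0, 2396), (0, 5294), (5, 2637), (0, 6732), (0, 6954), (4, 3413), (0, 2772), (0, 4954), (2, 2397), (0, 2396),
  (6, 5275), (0, 5274), (0, 6730), (5, 6821), (0, 5800), (0, 6868), (2, 4826), (0, 4790), (7, 2359), (0, 2350),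
  (0, 5270), (5, 5707), (0, 3402), (0, 3496), (4, 5557), (0, 1388), (0, 4782), (2, 2351), (0, 2350), (6, 3222),
  (0, 6804), (0, 7498), (5, 3497), (0, 2906), (0, 1388), (3, 4718), (0, 4700), (7, 6445), (0, 6442), (0, 6804),
  (6, 6986), (0, 5802), (0, 2772), (4, 5467), (0, 1210), (0, 4698), (2, 6443), (0, 5418), (7, 5781), (0, 3476),
  (0, 5802), (5, 2741), (0, 2484), (0, 5302), (3, 2647), (0, 2646), (8, 5418), (0, 7466), (0, 3412), (6, 5546),
  (0, 5482), (0, 2412), (4, 5294), (0, 5294), (0, 2636), (3, 7462), (0, 6954), (7, 2901), (0, 2772), (0, 4826),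
  (5, 2397), (0, 2394), (0, 5274), (4, 6733), (0, 6730), (8, 6821), (0, 5800), (0, 5844), (6, 4826), (0, 4790),
  (0, 2358), (4, 5271), (0, 5270), (10, 5707), (0, 3402), (0, 3496), (6, 5556), (0, 5484), (0, 4718), (5, 2351),
  (0, 2350), (0, 3222), (3, 3402), (0, 7498), (8, 3429), (0, 2904), (0, 5484), (5, 4717), (0, 4700), (0, 6444),
  (4, 6805), (0, 6804), (0, 6986), (2, 2901), (0, 2772), (7, 5467), (0, 1210), (0, 4698), (5, 6443), (0, 5418),
  (0, 5780), (4, 5802), (0, 5546), (9, 2741), (0, 2420), (0, 5302), (6, 2647), (0, 2646), (0, 5414), (4, 3733),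
  (0, 3412), (0, 5546), (2, 2485), (0, 2412), (6, 4782), (0, 5276), (0, 6732), (5, 7462), (0, 6822), (0, 2900),
  (3, 3434), (0, 4826), (11, 2397), (0, 2394), (0, 5274), (6, 6731), (0, 6730), (0, 6820), (5, 6996), (0, 5812),
  (0, 2778), (2, 2395), (0, 2358), (7, 5271), (0, 5270), (0, 5450), (5, 5797), (0, 3492), (0, 5556), (3, 2742),
  (0, 4718), (8, 2351), (0, 2350), (0, 3222), (6, 3402), (0, 7498), (0, 3428), (4, 5484), (0, 5468), (0, 4700),
  (3, 6446), (0, 6444), (7, 6805), (0, 6804), (0, 6986), (5, 2901), (0, 2772), (0, 5338), (4, 2653), (0, 2650),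
  (8, 5419), (0, 5418), (0, 5780), (6, 5802), (0, 5546), (0, 2740), (4, 5306), (0, 5302), (0, 2646), (3, 5415),
  (0, 3366), (7, 3667), (0, 3412), (0, 5546), (5, 2485), (0, 2412), (0, 5294), (4, 2638), (0, 6732), (8, 7462),
  (0, 6820), (0, 6996), (6, 3434), (0, 2778), (0, 2396), (4, 5277), (0, 5274), (0, 6698), (2, 6949)
]

-- port of Python 'bin(x).count("1")' for x ≥ 0: count the binary digits that are 1;
-- fuel-structural form of the digit loop (fuel n suffices since x halves each step)
def popcountAux : Nat → Nat → Nat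
  | 0, _ => 0
  | fuel + 1, n => if n = 0 then 0 else n % 2 + popcountAux fuel (n / 2)

def popcount (x : Int) : Int := (popcountAux x.toNat x.toNat : Nat)

-- Python 'a >> k' ; exact for a ≥ 0 and k ≥ 0 (mask and clamped shift are nonnegative)
def pyShr (a : Int) (k : Int) : Int := ((a.toNat >>> k.toNat : Nat) : Int)

def get_lunar_days_to_lday_alt (lyear : Int) (lmonth : Int) (lday : Int) (is_leap_month : Bool) : Int :=
  let e := (PySem.List.pyGet? LUNAR_YEAR_INFO (lyear - 1901)).getD (0, 0)
  let leap := e.1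
  let mask := e.2
  let p := if leap ≠ 0 ∧ (lmonth > leap ∨ (lmonth = leap ∧ is_leap_month = true)) then lmonth + 1 else lmonth
  let n := max 0 (min 13 (p - 1))
  29 * n + popcount (pyShr mask (13 - n)) + lday

-- ===== PRECONDITION & SPEC =====
-- A raises IndexError iff lyear - 1901 is outside the (negative-index-aware) range of the
-- 199-entry table; B raises on exactly the same inputs. Pre_ excludes only those.
def Pre_get_lunar_days_to_lday (lyear : Int) (lmonth : Int) (lday : Int) (is_leap_month : Bool) : Prop :=
  PySem.Raise.InRange 199 (lyear - 1901)
instance (lyear : Int) (lmonth : Int) (lday : Int) (is_leap_month : Bool) : Decidable (Pre_get_lunar_days_to_lday lyear lmonth lday is_leap_month) := by unfold Pre_get_lunar_days_to_lday; infer_instance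

def pvWitness_get_lunar_days_to_lday : Int × Int × Int × Bool := (1999, 5, 10, false)

def Spec_get_lunar_days_to_lday (lyear : Int) (lmonth : Int) (lday : Int) (is_leap_month : Bool) (out : Int) : Prop := out = get_lunar_days_to_lday_alt lyear lmonth lday is_leap_month
instance (lyear : Int) (lmonth : Int) (lday : Int) (is_leap_month : Bool) (out : Int) : Decidable (Spec_get_lunar_days_to_lday lyear lmonth lday is_leap_month out) := by unfold Spec_get_lunar_days_to_lday; infer_instance

-- ===== CLAIM (what is proved, stated in full; the proofs are below) =====
def Claim_equal_get_lunar_days_to_lday : Prop := ∀ (lyear : Int) (lmonth : Int) (lday : Int) (is_leap_month : Bool), Dom_get_lunar_days_to_lday lyear lmonth lday is_leap_month → Pre_get_lunar_days_to_lday lyear lmonth lday is_leap_month → Spec_get_lunar_days_to_lday lyear lmonth lday is_leap_month (get_lunar_days_to_lday lyear lmonth lday is_leap_month)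

-- ===== LEMMAS AND PROOFS =====

def dataOf (lyear : Int) : Int := (PySem.List.pyGet? LUNAR_CALENDAR_TABLE (lyear - 1901)).getD 0
def leapOf (data : Int) : Int := pyShrAnd data 20 0xF
def isLeapD (data x : Int) : Bool := if leapOf data ≠ 0 ∧ x = leapOf data then true else false
def conv (d : Int) : Int × Int := (pyShrAnd d 20 0xF, pyShrAnd d 7 0x1FFF)

-- A's loop, parameterised by the table entry instead of the year
def loopD (data : Int) (is_leap_month : Bool) (lunar_days lmonth leap_month_days bits : Int) :
    List Int → Int
  | [] => lunar_days
  | lmonth_index :: rest =>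
    let l_big_month := pyShrAnd data bits 1
    let lunar_days := if lmonth_index < lmonth then lunar_days + (29 + l_big_month) else lunar_days
    let leap_month_days := if isLeapD data lmonth_index then 29 + l_big_month else leap_month_days
    if isLeapD data (lmonth_index - 1) then
      if lmonth_index - 1 = lmonth ∧ is_leap_month = true then lunar_days + leap_month_days
      else if lmonth_index = lmonth then lunar_days + (29 + l_big_month)
      else
        let lmonth := if lmonth_index - 1 < lmonth ∧ lmonth_index ≠ lmonth then lmonth + 1 else lmonth
        loopD data is_leap_month lunar_days lmonth leap_month_days (bits - 1) rest
    else loopD data is_leap_month lunar_days lmonth leap_month_days (bits - 1) rest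

-- B's clamped slot count, as a function of the decoded leap month L
def nOf (L m : Int) (b : Bool) : Int :=
  max 0 (min 13 ((if L ≠ 0 ∧ (m > L ∨ (m = L ∧ b = true)) then m + 1 else m) - 1))

-- B's body, parameterised by A's table entry, without the final '+ lday'
def altCoreD (d m : Int) (b : Bool) : Int :=
  29 * nOf (pyShrAnd d 20 0xF) m b
    + popcount (pyShr (pyShrAnd d 7 0x1FFF) (13 - nOf (pyShrAnd d 20 0xF) m b))

theorem leapOf_nonneg (d : Int) : 0 ≤ leapOf d := Int.natCast_nonneg _

theorem isLeapD_eq_true {d x : Int} (h : isLeapD d x = true) : x = leapOf d ∧ leapOf d ≠ 0 := by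
  by_cases hc : leapOf d ≠ 0 ∧ x = leapOf d
  · exact ⟨hc.2, hc.1⟩
  · simp [isLeapD, if_neg hc] at h

theorem loop_eq_loopD (lyear : Int) (b : Bool) :
    ∀ (l : List Int) (ld lm lpd bits : Int),
      get_loop lyear b ld lm lpd bits l = loopD (dataOf lyear) b ld lm lpd bits l := by
  intro l
  induction l with
  | nil => intro ld lm lpd bits; rfl
  | cons x rest ih =>
    intro ld lm lpd bits
    simp only [get_loop, loopD, is_leap_lmonth, isLeapD, leapOf, dataOf]
    split_ifs <;> first | rfl | apply ih

theorem a_eq (lyear lmonth lday : Int) (b : Bool) :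
    get_lunar_days_to_lday lyear lmonth lday b
      = loopD (dataOf lyear) b 0 lmonth 0 19 (PySem.List.pyRange 1 14 1) + lday := by
  simp only [get_lunar_days_to_lday]
  rw [loop_eq_loopD]

set_option maxRecDepth 10000 in
theorem table_length : LUNAR_CALENDAR_TABLE.length = 199 := by rfl

set_option maxRecDepth 10000 in
theorem table_conv : LUNAR_YEAR_INFO = LUNAR_CALENDAR_TABLE.map conv := by decide

theorem pyGet?_map {α β : Type} (f : α → β) (l : List α) (i : Int) :
    PySem.List.pyGet? (l.map f) i = (PySem.List.pyGet? l i).map f := by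
  by_cases h0 : 0 ≤ i
  · rw [PySem.List.pyGet?_of_nonneg (l.map f) h0, PySem.List.pyGet?_of_nonneg l h0,
      List.getElem?_map]
  · by_cases hr : PySem.Raise.InRange l.length i
    · unfold PySem.Raise.InRange at hr
      have hk : i = -(((-i).toNat : Nat) : Int) := by omega
      rw [hk, PySem.List.pyGet?_neg_natCast (xs := l.map f) (k := (-i).toNat) (by omega)
            (by simp; omega),
          PySem.List.pyGet?_neg_natCast (xs := l) (k := (-i).toNat) (by omega) (by omega),
          List.length_map, List.getElem?_map]
    · rw [(PySem.List.pyGet?_eq_none_iff _ _).mpr, (PySem.List.pyGet?_eq_none_iff _ _).mpr hr]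
      · rfl
      · simpa [List.length_map] using hr

theorem pyGet?_map_conv (i : Int) :
    PySem.List.pyGet? LUNAR_YEAR_INFO i = (PySem.List.pyGet? LUNAR_CALENDAR_TABLE i).map conv := by
  rw [table_conv, pyGet?_map]

theorem alt_eq (lyear lmonth lday : Int) (b : Bool)
    (h : PySem.Raise.InRange 199 (lyear - 1901)) :
    get_lunar_days_to_lday_alt lyear lmonth lday b = altCoreD (dataOf lyear) lmonth b + lday := by
  unfold get_lunar_days_to_lday_alt
  rw [pyGet?_map_conv]
  cases hc : PySem.List.pyGet? LUNAR_CALENDAR_TABLE (lyear - 1901) with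
  | none =>
    rw [PySem.List.pyGet?_eq_none_iff, table_length] at hc
    exact absurd h hc
  | some d =>
    simp [dataOf, hc, altCoreD, nOf, conv]

theorem loopD_ge (d : Int) (b : Bool) :
    ∀ (l : List Int), (∀ x ∈ l, x ≤ 13) →
      ∀ (ld lm lm' lpd bits : Int), 14 ≤ lm → 14 ≤ lm' →
        loopD d b ld lm lpd bits l = loopD d b ld lm' lpd bits l := by
  intro l
  induction l with
  | nil => intros; rfl
  | cons x rest ih =>
    intro hall ld lm lm' lpd bits h1 h2
    have hx : x ≤ 13 := hall x List.mem_cons_self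
    have hrest : ∀ y ∈ rest, y ≤ 13 := fun y hy => hall y (List.mem_cons_of_mem _ hy)
    simp only [loopD]
    rw [if_pos (by omega : x < lm), if_pos (by omega : x < lm')]
    by_cases hl : isLeapD d (x - 1) = true
    · rw [if_pos hl, if_pos hl,
          if_neg (show ¬(x - 1 = lm ∧ b = true) by rintro ⟨h, _⟩; omega),
          if_neg (show ¬(x - 1 = lm' ∧ b = true) by rintro ⟨h, _⟩; omega),
          if_neg (show ¬ x = lm by omega), if_neg (show ¬ x = lm' by omega),
          if_pos (show x - 1 < lm ∧ x ≠ lm from ⟨by omega, by omega⟩),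
          if_pos (show x - 1 < lm' ∧ x ≠ lm' from ⟨by omega, by omega⟩)]
      exact ih hrest _ _ _ _ _ (by omega) (by omega)
    · rw [if_neg hl, if_neg hl]
      exact ih hrest _ _ _ _ _ h1 h2

theorem loopD_le (d : Int) (b : Bool) :
    ∀ (l : List Int), (∀ x ∈ l, 1 ≤ x) →
      ∀ (ld lm lpd bits : Int), lm ≤ 0 →
        loopD d b ld lm lpd bits l = ld := by
  intro l
  induction l with
  | nil => intros; rfl
  | cons x rest ih =>
    intro hall ld lm lpd bits hm
    have hx : 1 ≤ x := hall x List.mem_cons_self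
    have hrest : ∀ y ∈ rest, 1 ≤ y := fun y hy => hall y (List.mem_cons_of_mem _ hy)
    simp only [loopD]
    rw [if_neg (by omega : ¬ x < lm)]
    by_cases hl : isLeapD d (x - 1) = true
    · obtain ⟨heq, hne⟩ := isLeapD_eq_true hl
      have hpos : 1 ≤ x - 1 := by have := leapOf_nonneg d; omega
      rw [if_pos hl,
          if_neg (show ¬(x - 1 = lm ∧ b = true) by rintro ⟨h, _⟩; omega),
          if_neg (show ¬ x = lm by omega),
          if_neg (show ¬(x - 1 < lm ∧ x ≠ lm) by rintro ⟨h, _⟩; omega)]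
      exact ih hrest _ _ _ _ hm
    · rw [if_neg hl]
      exact ih hrest _ _ _ _ hm

theorem nOf_le (L m : Int) (b : Bool) (hm : m ≤ 0) : nOf L m b = nOf L 0 b := by
  unfold nOf; split_ifs <;> omega

theorem nOf_ge (L m : Int) (b : Bool) (hm : 14 ≤ m) : nOf L m b = nOf L 14 b := by
  unfold nOf; split_ifs <;> omega

theorem altCoreD_le (d m : Int) (b : Bool) (hm : m ≤ 0) : altCoreD d m b = altCoreD d 0 b := by
  unfold altCoreD
  rw [nOf_le _ _ _ hm]

theorem altCoreD_ge (d m : Int) (b : Bool) (hm : 14 ≤ m) : altCoreD d m b = altCoreD d 14 b := by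
  unfold altCoreD
  rw [nOf_ge _ _ _ hm]

theorem data_mem (lyear : Int) (h : PySem.Raise.InRange 199 (lyear - 1901)) :
    dataOf lyear ∈ LUNAR_CALENDAR_TABLE := by
  cases hc : PySem.List.pyGet? LUNAR_CALENDAR_TABLE (lyear - 1901) with
  | none =>
    rw [PySem.List.pyGet?_eq_none_iff, table_length] at hc
    exact absurd h hc
  | some v =>
    have hv := PySem.List.mem_of_pyGet?_eq_some _ hc
    simpa [dataOf, hc] using hv

theorem range_le : ∀ x ∈ PySem.List.pyRange 1 14 1, x ≤ 13 := by
  intro x hx; rw [PySem.List.mem_pyRange_one] at hx; omega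
theorem range_ge : ∀ x ∈ PySem.List.pyRange 1 14 1, 1 ≤ x := by
  intro x hx; rw [PySem.List.mem_pyRange_one] at hx; omega

set_option maxHeartbeats 4000000 in
set_option maxRecDepth 100000 in
theorem core_eq : ∀ d ∈ LUNAR_CALENDAR_TABLE, ∀ m ∈ PySem.List.pyRange 0 15 1, ∀ b : Bool,
    loopD d b 0 m 0 19 (PySem.List.pyRange 1 14 1) = altCoreD d m b := by decide

-- ===== VERDICT (by name: the statement is the Claim_ definition above) =====
theorem get_lunar_days_to_lday_spec : Claim_equal_get_lunar_days_to_lday := by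
  intro lyear lmonth lday b _ hpre
  unfold Spec_get_lunar_days_to_lday
  rw [a_eq, alt_eq _ _ _ _ hpre]
  have hmem := data_mem lyear hpre
  have key : ∀ m : Int, 0 ≤ m → m ≤ 14 →
      loopD (dataOf lyear) b 0 m 0 19 (PySem.List.pyRange 1 14 1) = altCoreD (dataOf lyear) m b :=
    fun m h0 h14 => core_eq _ hmem m (PySem.List.mem_pyRange_one.mpr ⟨by omega, by omega⟩) b
  by_cases hm : lmonth ≤ 0
  · have h2 : loopD (dataOf lyear) b 0 0 0 19 (PySem.List.pyRange 1 14 1) = 0 :=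
      loopD_le _ _ _ range_ge 0 0 0 19 le_rfl
    rw [loopD_le _ _ _ range_ge _ _ _ _ hm, altCoreD_le _ _ _ hm, ← key 0 le_rfl (by omega), h2]
  · by_cases hm' : lmonth ≤ 14
    · rw [key lmonth (by omega) hm']
    · rw [loopD_ge _ _ _ range_le _ _ 14 _ _ (by omega) (by omega),
          altCoreD_ge _ _ _ (by omega), key 14 (by omega) le_rfl]
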